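-- pv_equiv track=rewrite | github.com/universal-mcp/google-sheet | src/universal_mcp_google_sheet/helper.py | find_table_regions
-- ===== SOURCE A (Python) =====
-- from typing import Any, List, Dict, Tuple
--
-- def find_table_regions(values: List[List], min_rows: int, min_columns: int) -> List[Dict]:
--     """Find potential table regions in the data."""
--     regions = []
--
--     if not values or len(values) < min_rows:
--         return regions
--
--     rows = len(values)
--     cols = max(len(row) for row in values) if values else 0
--
--     if cols < min_columns:
--         return regions
--
--     # Simple heuristic: look for regions with consistent data
--     current_start = -1
--
--     for i in range(rows):
--         # Check if this row has enough data
--         row_data_count = sum(1 for cell in values[i] if cell and str(cell).strip())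
--
--         if row_data_count >= min_columns:
--             # Continue current region
--             if current_start == -1:
--                 current_start = i
--         else:
--             # End current region if it's valid
--             if current_start != -1 and i - current_start >= min_rows:
--                 regions.append({
--                     "start_row": current_start,
--                     "end_row": i - 1,
--                     "start_column": 0,
--                     "end_column": cols - 1
--                 })
--             current_start = -1
--
--     # Handle region that extends to end
--     if current_start != -1 and rows - current_start >= min_rows:
--         regions.append({
--             "start_row": current_start,
--             "end_row": rows - 1,
--             "start_column": 0,
--             "end_column": cols - 1
--         })
--
--     return regions
-- ===== SOURCE B (Python) =====
-- def find_table_regions(values, min_rows, min_columns):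
--     """Boundary detection: mark run starts/ends by neighbour comparison, pair them up."""
--     if not values or len(values) < min_rows:
--         return []
--     cols = max(len(row) for row in values)
--     if cols < min_columns:
--         return []
--     dense = [sum(1 for cell in row if cell and str(cell).strip()) >= min_columns
--              for row in values]
--     starts = [i for i, (d, p) in enumerate(zip(dense, [False] + dense)) if d and not p]
--     ends = [i for i, (d, nx) in enumerate(zip(dense, dense[1:] + [False])) if d and not nx]
--     return [{"start_row": s, "end_row": e, "start_column": 0, "end_column": cols - 1}
--             for s, e in zip(starts, ends) if e - s + 1 >= min_rows]
-- ===== Notes on version B (the rewrite author's own statement) =====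
-- stated objective: alternative
-- what changed: B replaces A's current_start state machine with boundary detection: it marks run starts (dense row whose predecessor is not dense) and run ends (dense row whose successor is not dense) by zipping the density mask with its shifted copies, then pairs starts with ends positionally and keeps pairs spanning at least min_rows rows.
import Mathlib
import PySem

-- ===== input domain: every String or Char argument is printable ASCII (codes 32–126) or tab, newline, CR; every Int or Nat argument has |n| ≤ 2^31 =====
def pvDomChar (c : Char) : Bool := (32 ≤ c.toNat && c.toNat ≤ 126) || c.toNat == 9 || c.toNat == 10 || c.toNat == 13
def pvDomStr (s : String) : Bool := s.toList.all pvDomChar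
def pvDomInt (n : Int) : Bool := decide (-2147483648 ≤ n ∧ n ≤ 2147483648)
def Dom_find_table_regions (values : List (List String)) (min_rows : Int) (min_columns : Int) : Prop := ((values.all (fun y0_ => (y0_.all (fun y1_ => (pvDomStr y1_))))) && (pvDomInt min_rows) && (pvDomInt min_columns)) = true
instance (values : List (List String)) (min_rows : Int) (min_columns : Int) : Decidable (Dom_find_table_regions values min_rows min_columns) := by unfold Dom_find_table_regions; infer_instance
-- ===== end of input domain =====

-- B replaces A's current_start state machine by boundary detection: run starts/ends found by zipping the density mask with shifted copies, then paired positionally (objective: alternative; equal cost).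

-- ===== PORT A =====
-- the region dict literal {"start_row": s, "end_row": e, "start_column": 0, "end_column": cols-1}
def pvMk (cols s e : Int) : List (String × Int) :=
  [("start_row", s), ("end_row", e), ("start_column", 0), ("end_column", cols - 1)]

-- sum(1 for cell in row if cell and str(cell).strip()); str(cell) is cell itself (cells are strings)
def pvRowCount (row : List String) : Int :=
  row.foldl (fun acc cell => if cell ≠ "" ∧ PySem.Str.strip cell ≠ "" then acc + 1 else acc) 0

-- A's loop body; state = (regions, current_start); values[i] via pyGetD (i always in range here)
def pvAStep (values : List (List String)) (min_rows min_columns cols : Int)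
    (st : List (List (String × Int)) × Int) (i : Int) : List (List (String × Int)) × Int :=
  let row_data_count := pvRowCount (PySem.List.pyGetD values i [])
  if row_data_count ≥ min_columns then
    (st.1, if st.2 = -1 then i else st.2)
  else
    (if st.2 ≠ -1 ∧ i - st.2 ≥ min_rows then st.1 ++ [pvMk cols st.2 (i - 1)] else st.1, -1)

def find_table_regions (values : List (List String)) (min_rows : Int) (min_columns : Int) : List (List (String × Int)) :=
  if values = [] ∨ (values.length : Int) < min_rows then []
  else
    let rows : Int := (values.length : Int)
    -- cols = max(len(row) for row in values) if values else 0 (values ≠ [] here, so getD 0 is never used)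
    let cols : Int := (PySem.List.max? (values.map fun row => ((row.length : Int))) (fun x => x)).getD 0
    if cols < min_columns then []
    else
      let st := (PySem.List.pyRange 0 rows 1).foldl (pvAStep values min_rows min_columns cols) ([], -1)
      if st.2 ≠ -1 ∧ rows - st.2 ≥ min_rows then st.1 ++ [pvMk cols st.2 (rows - 1)] else st.1

-- ===== PORT B =====
-- Source B: dense mask, then starts = rows dense with non-dense predecessor (zip with [False]+dense),
-- ends = rows dense with non-dense successor (zip with dense[1:]+[False]), zipped pairwise.
def find_table_regions_alt (values : List (List String)) (min_rows : Int) (min_columns : Int) : List (List (String × Int)) :=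
  if values = [] ∨ (values.length : Int) < min_rows then []
  else
    let cols : Int := (PySem.List.max? (values.map fun row => ((row.length : Int))) (fun x => x)).getD 0
    if cols < min_columns then []
    else
      let dense := values.map (fun row => decide (pvRowCount row ≥ min_columns))
      let starts := ((PySem.List.enumerate (dense.zip (false :: dense)) 0).filter
        (fun x => x.2.1 && !x.2.2)).map (fun x => x.1)
      -- dense[1:] + [False]
      let ends := ((PySem.List.enumerate (dense.zip (PySem.List.slice dense (some 1) none ++ [false])) 0).filter
        (fun x => x.2.1 && !x.2.2)).map (fun x => x.1)
      ((starts.zip ends).filter (fun p => decide (p.2 - p.1 + 1 ≥ min_rows))).map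
        (fun p => pvMk cols p.1 p.2)

-- ===== PRECONDITION & SPEC =====
def Spec_find_table_regions (values : List (List String)) (min_rows : Int) (min_columns : Int) (out : List (List (String × Int))) : Prop := out = find_table_regions_alt values min_rows min_columns
instance (values : List (List String)) (min_rows : Int) (min_columns : Int) (out : List (List (String × Int))) : Decidable (Spec_find_table_regions values min_rows min_columns out) := by unfold Spec_find_table_regions; infer_instance

-- ===== CLAIM (what is proved, stated in full; the proofs are below) =====
def Claim_equal_find_table_regions : Prop := ∀ (values : List (List String)) (min_rows : Int) (min_columns : Int), Dom_find_table_regions values min_rows min_columns → Spec_find_table_regions values min_rows min_columns (find_table_regions values min_rows min_columns)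

-- ===== LEMMAS AND PROOFS =====

-- length of the leading run of `true`s in a mask
def pvTakeRun : List Bool → Nat
  | true :: rest => pvTakeRun rest + 1
  | _ => 0

-- the maximal runs of `true`s in a mask as (start, end) index pairs
def pvRuns : List Bool → Int → List (Int × Int)
  | [], _ => []
  | false :: rest, i => pvRuns rest (i + 1)
  | true :: rest, i =>
      let k : Nat := pvTakeRun rest + 1
      (i, i + (k : Int) - 1) :: pvRuns (rest.drop (k - 1)) (i + (k : Int))
termination_by l _ => l.length
decreasing_by
  all_goals simp [List.length_drop]

-- run-at-a-time emission of the qualifying regions (intermediate between A's fold and B's zip)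
def pvScanRuns (min_rows cols : Int) : List Bool → Int → List (List (String × Int))
  | [], _ => []
  | false :: rest, i => pvScanRuns min_rows cols rest (i + 1)
  | true :: rest, i =>
      let k : Nat := pvTakeRun rest + 1
      (if (k : Int) ≥ min_rows then [pvMk cols i (i + (k : Int) - 1)] else []) ++
        pvScanRuns min_rows cols (rest.drop (k - 1)) (i + (k : Int))
termination_by l _ => l.length
decreasing_by
  all_goals simp [List.length_drop]

-- A's loop + final tail check, re-expressed as structural recursion over the density mask
def pvAfold (min_rows cols : Int) : List Bool → Int → Int → List (List (String × Int)) → List (List (String × Int))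
  | [], i, cs, regs => if cs ≠ -1 ∧ i - cs ≥ min_rows then regs ++ [pvMk cols cs (i - 1)] else regs
  | b :: rest, i, cs, regs =>
      if b then pvAfold min_rows cols rest (i + 1) (if cs = -1 then i else cs) regs
      else pvAfold min_rows cols rest (i + 1) (-1)
             (if cs ≠ -1 ∧ i - cs ≥ min_rows then regs ++ [pvMk cols cs (i - 1)] else regs)

def pvFin (min_rows cols rows : Int) (st : List (List (String × Int)) × Int) : List (List (String × Int)) :=
  if st.2 ≠ -1 ∧ rows - st.2 ≥ min_rows then st.1 ++ [pvMk cols st.2 (rows - 1)] else st.1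

-- B's start-marking pass, structurally (p = previous row's density flag)
def pvStartsF : List Bool → Bool → Int → List Int
  | [], _, _ => []
  | d :: r, p, i => (if d && !p then [i] else []) ++ pvStartsF r d (i + 1)

-- B's end-marking pass, structurally (next flag is the head of the remainder, or false)
def pvEndsF : List Bool → Int → List Int
  | [], _ => []
  | d :: r, i => (if d && !(r.headD false) then [i] else []) ++ pvEndsF r (i + 1)

lemma pvA_loop (values : List (List String)) (min_rows min_columns cols : Int) :
    ∀ (k : Nat), k ≤ values.length → ∀ (cs : Int) (regs : List (List (String × Int))),
    pvFin min_rows cols (values.length : Int)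
        ((PySem.List.pyRange (k : Int) (values.length : Int) 1).foldl
          (pvAStep values min_rows min_columns cols) (regs, cs))
    = pvAfold min_rows cols ((values.drop k).map (fun row => decide (pvRowCount row ≥ min_columns)))
        (k : Int) cs regs := by
  intro k
  induction hn : values.length - k generalizing k with
  | zero =>
    intro hk cs regs
    have hk' : k = values.length := by omega
    subst hk'
    rw [PySem.List.pyRange_one_eq_nil le_rfl]
    simp only [List.drop_length, List.map_nil, List.foldl_nil, pvAfold, pvFin]
  | succ n ih =>
    intro hk cs regs
    have hlt : k < values.length := by omega
    rw [PySem.List.pyRange_one_cons (by exact_mod_cast hlt)]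
    rw [List.drop_eq_getElem_cons hlt]
    have hget : PySem.List.pyGetD values (k : Int) [] = values[k] := by
      rw [PySem.List.pyGetD_natCast]; exact List.getD_eq_getElem _ _ hlt
    simp only [List.foldl_cons, List.map_cons, pvAStep, hget, pvAfold]
    have hstep := ih (k + 1) (by omega) (by omega)
    push_cast at hstep
    by_cases hc : pvRowCount values[k] ≥ min_columns
    · simp only [hc, if_pos, decide_true]
      exact hstep _ _
    · simp only [hc, if_neg, not_false_iff, decide_false, Bool.false_eq_true]
      exact hstep _ _

lemma pvAfold_run (min_rows cols : Int) :
    ∀ (N : Nat) (mask : List Bool), mask.length ≤ N →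
      (∀ (i c : Int) (regs : List (List (String × Int))), 0 ≤ i → 0 ≤ c →
        pvAfold min_rows cols mask i c regs =
          (regs ++ if i + (pvTakeRun mask : Int) - c ≥ min_rows then
              [pvMk cols c (i + (pvTakeRun mask : Int) - 1)] else []) ++
            pvScanRuns min_rows cols (mask.drop (pvTakeRun mask)) (i + (pvTakeRun mask : Int)))
      ∧ (∀ (i : Int) (regs : List (List (String × Int))), 0 ≤ i →
        pvAfold min_rows cols mask i (-1) regs = regs ++ pvScanRuns min_rows cols mask i) := by
  intro N
  induction N with
  | zero =>
    intro mask hm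
    have hmask : mask = [] := by cases mask <;> simp at hm ⊢
    subst hmask
    constructor
    · intro i c regs hi hc
      simp only [pvTakeRun, pvAfold, pvScanRuns, List.drop_zero, Nat.cast_zero, add_zero,
        List.append_nil]
      split_ifs <;> simp_all
    · intro i regs hi
      simp only [pvAfold, pvScanRuns, List.append_nil]
      rw [if_neg (by simp)]
  | succ n ih =>
    intro mask hm
    have hrun : ∀ (i c : Int) (regs : List (List (String × Int))), 0 ≤ i → 0 ≤ c →
        pvAfold min_rows cols mask i c regs =
          (regs ++ if i + (pvTakeRun mask : Int) - c ≥ min_rows then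
              [pvMk cols c (i + (pvTakeRun mask : Int) - 1)] else []) ++
            pvScanRuns min_rows cols (mask.drop (pvTakeRun mask)) (i + (pvTakeRun mask : Int)) := by
      intro i c regs hi hc
      match mask, hm with
      | [], _ =>
        simp only [pvTakeRun, pvAfold, pvScanRuns, List.drop_zero, Nat.cast_zero, add_zero,
          List.append_nil]
        split_ifs <;> simp_all
      | true :: rest, hm =>
        have hmr : rest.length ≤ n := by simp at hm; omega
        have hne : ¬ (c = -1) := by omega
        simp only [pvAfold, if_true, hne, if_false]
        rw [(ih rest hmr).1 (i + 1) c regs (by omega) hc]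
        simp only [pvTakeRun, List.drop_succ_cons]
        push_cast
        have e1 : i + 1 + (pvTakeRun rest : Int) - c = i + ((pvTakeRun rest : Int) + 1) - c := by
          ring
        have e2 : i + 1 + (pvTakeRun rest : Int) - 1 = i + ((pvTakeRun rest : Int) + 1) - 1 := by
          ring
        have e3 : i + 1 + (pvTakeRun rest : Int) = i + ((pvTakeRun rest : Int) + 1) := by ring
        rw [e1, e2, e3]
      | false :: rest, hm =>
        have hmr : rest.length ≤ n := by simp at hm; omega
        have hne : ¬ (c = -1) := by omega
        simp only [pvAfold, Bool.false_eq_true, if_false, hne, ne_eq, not_false_iff, true_and,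
          pvTakeRun, Nat.cast_zero, add_zero, List.drop_zero, pvScanRuns]
        rw [(ih rest hmr).2 (i + 1) _ (by omega)]
        split_ifs <;> simp [List.append_assoc]
    refine ⟨hrun, ?_⟩
    intro i regs hi
    match mask, hm with
    | [], _ =>
      simp only [pvAfold, pvScanRuns, List.append_nil]
      rw [if_neg (by simp)]
    | true :: rest, hm =>
      have hmr : rest.length ≤ n := by simp at hm; omega
      have h1 := (ih rest hmr).1 (i + 1) i regs (by omega) hi
      simp only [pvAfold, if_true]
      rw [h1]
      simp only [pvScanRuns, Nat.add_sub_cancel]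
      push_cast
      have e1 : i + 1 + (pvTakeRun rest : Int) - i = (pvTakeRun rest : Int) + 1 := by ring
      have e2 : i + 1 + (pvTakeRun rest : Int) - 1 = i + ((pvTakeRun rest : Int) + 1) - 1 := by
        ring
      have e3 : i + 1 + (pvTakeRun rest : Int) = i + ((pvTakeRun rest : Int) + 1) := by ring
      rw [e1, e2, e3, List.append_assoc]
    | false :: rest, hm =>
      have hmr : rest.length ≤ n := by simp at hm; omega
      simp only [pvAfold, Bool.false_eq_true, if_false, pvScanRuns]
      rw [if_neg (by simp)]
      exact (ih rest hmr).2 (i + 1) regs (by omega)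

lemma pvAfold_scan (min_rows cols : Int) :
    ∀ (mask : List Bool) (i : Int), 0 ≤ i → ∀ (regs : List (List (String × Int))),
      pvAfold min_rows cols mask i (-1) regs = regs ++ pvScanRuns min_rows cols mask i := by
  intro mask i hi regs
  exact (pvAfold_run min_rows cols mask.length mask le_rfl).2 i regs hi

-- pvScanRuns is the filter-and-map of the run list
lemma pvScan_runs (min_rows cols : Int) :
    ∀ (N : Nat) (mask : List Bool), mask.length ≤ N → ∀ (i : Int),
      pvScanRuns min_rows cols mask i =
        ((pvRuns mask i).filter (fun p => decide (p.2 - p.1 + 1 ≥ min_rows))).map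
          (fun p => pvMk cols p.1 p.2) := by
  intro N
  induction N with
  | zero =>
    intro mask hm i
    have : mask = [] := by cases mask <;> simp at hm ⊢
    subst this
    simp [pvScanRuns, pvRuns]
  | succ n ih =>
    intro mask hm i
    match mask, hm with
    | [], _ => simp [pvScanRuns, pvRuns]
    | false :: rest, hm =>
      have hmr : rest.length ≤ n := by simp at hm; omega
      simp only [pvScanRuns, pvRuns]
      exact ih rest hmr (i + 1)
    | true :: rest, hm =>
      have hmr : (rest.drop (pvTakeRun rest + 1 - 1)).length ≤ n := by
        simp only [List.length_drop]; simp at hm; omega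
      simp only [pvScanRuns, pvRuns, List.filter_cons]
      rw [ih _ hmr (i + ((pvTakeRun rest + 1 : Nat) : Int))]
      by_cases h : ((pvTakeRun rest + 1 : Nat) : Int) ≥ min_rows
      · rw [if_pos h, if_pos (decide_eq_true (by push_cast at h ⊢; omega))]
        simp
      · rw [if_neg h, if_neg (by simp only [decide_eq_true_eq]; push_cast at h ⊢; omega)]
        simp

-- B's start pass over the zipped lists equals pvStartsF
lemma pvB_starts (dense : List Bool) :
    ∀ (p : Bool) (i : Int),
      ((PySem.List.enumerate (dense.zip (p :: dense)) i).filter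
        (fun x => x.2.1 && !x.2.2)).map (fun x => x.1) = pvStartsF dense p i := by
  induction dense with
  | nil => intro p i; simp [pvStartsF, PySem.List.enumerate_nil]
  | cons d r ihd =>
    intro p i
    simp only [List.zip_cons_cons, PySem.List.enumerate_cons, List.filter_cons, pvStartsF]
    by_cases h : (d && !p) = true
    · rw [if_pos (by simpa using h), h]
      simp only [List.map_cons, ihd d (i + 1)]
      rfl
    · rw [if_neg (by simpa using h)]
      simp only [h, Bool.false_eq_true, if_neg (by simp : ¬False)]
      simp only [ihd d (i + 1)]
      simp [h]

-- B's end pass over the zipped lists equals pvEndsF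
lemma pvB_ends (dense : List Bool) :
    ∀ (i : Int),
      ((PySem.List.enumerate (dense.zip (dense.tail ++ [false])) i).filter
        (fun x => x.2.1 && !x.2.2)).map (fun x => x.1) = pvEndsF dense i := by
  induction dense with
  | nil => intro i; simp [pvEndsF, PySem.List.enumerate_nil]
  | cons d r ihd =>
    intro i
    have hz : (d :: r).zip ((d :: r).tail ++ [false])
        = (d, r.headD false) :: r.zip (r.tail ++ [false]) := by
      cases r <;> simp [List.zip_cons_cons]
    rw [hz]
    simp only [PySem.List.enumerate_cons, List.filter_cons, pvEndsF]
    by_cases h : (d && !(r.headD false)) = true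
    · rw [if_pos (by simpa using h), h]
      simp [ihd (i + 1)]
    · rw [if_neg (by simpa using h)]
      simp only [h, Bool.false_eq_true, if_neg (by simp : ¬False)]
      simp [ihd (i + 1)]

-- the start/end passes list exactly the firsts/seconds of the runs
lemma pvStarts_runs :
    ∀ (N : Nat) (mask : List Bool), mask.length ≤ N →
      (∀ (i : Int), pvStartsF mask false i = (pvRuns mask i).map (fun p => p.1))
      ∧ (∀ (i : Int), pvStartsF mask true i =
          (pvRuns (mask.drop (pvTakeRun mask)) (i + (pvTakeRun mask : Int))).map (fun p => p.1)) := by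
  intro N
  induction N with
  | zero =>
    intro mask hm
    have : mask = [] := by cases mask <;> simp at hm ⊢
    subst this
    constructor <;> intro i <;> simp [pvStartsF, pvRuns, pvTakeRun]
  | succ n ih =>
    intro mask hm
    match mask, hm with
    | [], _ => constructor <;> intro i <;> simp [pvStartsF, pvRuns, pvTakeRun]
    | false :: rest, hm =>
      have hmr : rest.length ≤ n := by simp at hm; omega
      constructor <;> intro i
      · simp only [pvStartsF, pvRuns, Bool.false_and, if_neg (by simp : ¬(false = true)),
          List.nil_append]
        exact (ih rest hmr).1 (i + 1)
      · simp only [pvStartsF, pvTakeRun, List.drop_zero, Nat.cast_zero, add_zero, pvRuns,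
          Bool.false_and, if_neg (by simp : ¬(false = true)), List.nil_append]
        exact (ih rest hmr).1 (i + 1)
    | true :: rest, hm =>
      have hmr : rest.length ≤ n := by simp at hm; omega
      constructor <;> intro i
      · simp only [pvStartsF, pvRuns, List.map_cons]
        rw [(ih rest hmr).2 (i + 1)]
        simp only [Nat.add_sub_cancel]
        push_cast
        have : i + 1 + (pvTakeRun rest : Int) = i + ((pvTakeRun rest : Int) + 1) := by ring
        rw [this]
        simp
      · simp only [pvStartsF, pvTakeRun, List.drop_succ_cons]
        rw [(ih rest hmr).2 (i + 1)]
        push_cast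
        have : i + 1 + (pvTakeRun rest : Int) = i + ((pvTakeRun rest : Int) + 1) := by ring
        rw [this]
        simp

lemma pvEnds_runs :
    ∀ (N : Nat) (mask : List Bool), mask.length ≤ N → ∀ (i : Int),
      pvEndsF mask i = (pvRuns mask i).map (fun p => p.2) := by
  intro N
  induction N with
  | zero =>
    intro mask hm i
    have : mask = [] := by cases mask <;> simp at hm ⊢
    subst this
    simp [pvEndsF, pvRuns]
  | succ n ih =>
    intro mask hm i
    match mask, hm with
    | [], _ => simp [pvEndsF, pvRuns]
    | false :: rest, hm =>
      have hmr : rest.length ≤ n := by simp at hm; omega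
      simp only [pvEndsF, pvRuns, Bool.false_and, if_neg (by simp : ¬(false = true)),
        List.nil_append]
      exact ih rest hmr (i + 1)
    | true :: rest, hm =>
      have hmr : rest.length ≤ n := by simp at hm; omega
      match rest with
      | [] =>
        simp [pvEndsF, pvRuns, pvTakeRun]
      | false :: r' =>
        rw [pvEndsF, ih _ hmr (i + 1)]
        conv_rhs => rw [pvRuns]
        simp only [pvTakeRun, List.headD_cons, Bool.not_false, Bool.and_true,
          List.drop_succ_cons, List.drop_zero, List.map_cons]
        simp
      | true :: r' =>
        rw [pvEndsF, ih _ hmr (i + 1)]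
        conv_lhs => rw [pvRuns]
        conv_rhs => rw [pvRuns]
        simp only [pvTakeRun, List.headD_cons, Bool.not_true, Bool.and_false,
          List.drop_succ_cons, List.map_cons]
        push_cast
        simp only [List.nil_append, List.drop_succ_cons]
        have e : i + 1 + ((pvTakeRun r' : Int) + 1) = i + ((pvTakeRun r' : Int) + 1 + 1) := by ring
        rw [e]

-- ===== VERDICT (by name: the statement is the Claim_ definition above) =====
theorem find_table_regions_spec : Claim_equal_find_table_regions := by
  intro values min_rows min_columns _
  unfold Spec_find_table_regions find_table_regions find_table_regions_alt
  split
  · rfl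
  · simp only []
    split
    · rfl
    · -- A side: fold = pvScanRuns over the mask
      set cols : Int :=
        (PySem.List.max? (values.map fun row => ((row.length : Int))) (fun x => x)).getD 0 with hcols
      set dense := values.map (fun row => decide (pvRowCount row ≥ min_columns)) with hdense
      have hA := pvA_loop values min_rows min_columns cols 0 (Nat.zero_le _) (-1) []
      simp only [Nat.cast_zero, List.drop_zero] at hA
      rw [pvAfold_scan _ _ _ 0 le_rfl, List.nil_append] at hA
      rw [← hdense] at hA
      simp only [pvFin] at hA
      rw [hA]
      -- B side: boundary zip = runs
      rw [PySem.List.slice_from_one]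
      rw [pvB_starts dense false 0, pvB_ends dense 0]
      rw [(pvStarts_runs dense.length dense le_rfl).1 0]
      rw [pvEnds_runs dense.length dense le_rfl 0]
      rw [List.zip_map']
      rw [pvScan_runs min_rows cols dense.length dense le_rfl 0]
      simp
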